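-- pv_equiv track=rewrite | github.com/saajiidi/Order-Process-Automation | app_modules/wp_tab.py | _has_fuzzy_column
-- ===== SOURCE A (Python) =====
-- def _has_fuzzy_column(columns: list[str], aliases: list[str]) -> bool:
--     cols_lower = [str(col).strip().lower() for col in columns]
--     for alias in aliases:
--         alias = alias.lower()
--         if alias in cols_lower:
--             return True
--     for alias in aliases:
--         alias = alias.lower()
--         if any(alias in col for col in cols_lower):
--             return True
--     return False
-- ===== SOURCE B (Python) =====
-- def _has_fuzzy_column(columns: list[str], aliases: list[str]) -> bool:
--     # Column-major single scan: normalise each column on the fly and test all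
--     # (pre-lowered) aliases against it; exact matches are substring matches,
--     # so A's separate exact-match pass is redundant and dropped.
--     aliases_lower = [alias.lower() for alias in aliases]
--     for col in columns:
--         col_norm = str(col).strip().lower()
--         if any(a in col_norm for a in aliases_lower):
--             return True
--     return False
-- ===== Notes on version B (the rewrite author's own statement) =====
-- stated objective: simpler
-- what changed: B drops A's redundant exact-match pass (an exact match is a substring match) and scans column-major in a single pass, normalising each column once on the fly instead of building cols_lower and walking it twice per alias.
import Mathlib
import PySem

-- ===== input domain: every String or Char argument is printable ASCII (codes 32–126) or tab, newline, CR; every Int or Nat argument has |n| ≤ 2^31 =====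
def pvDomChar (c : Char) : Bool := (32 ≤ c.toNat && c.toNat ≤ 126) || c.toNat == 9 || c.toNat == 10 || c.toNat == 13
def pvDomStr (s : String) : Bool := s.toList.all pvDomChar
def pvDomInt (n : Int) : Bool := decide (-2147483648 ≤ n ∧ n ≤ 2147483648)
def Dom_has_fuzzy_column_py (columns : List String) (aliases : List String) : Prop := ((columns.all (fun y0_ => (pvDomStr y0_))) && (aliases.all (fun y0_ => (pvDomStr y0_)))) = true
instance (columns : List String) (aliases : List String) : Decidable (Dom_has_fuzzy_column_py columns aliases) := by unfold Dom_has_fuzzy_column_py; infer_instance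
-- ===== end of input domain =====

-- B replaces A's two sequential alias-major passes (exact match, then substring) by one
-- column-major substring scan with pre-lowered aliases; same return value, simpler.


-- ===== PORT A =====
-- cols_lower = [str(col).strip().lower() for col in columns]; first loop: exact membership;
-- second loop: substring; early 'return True' of each loop is the Bool 'any'.
def has_fuzzy_column_py (columns : List String) (aliases : List String) : Bool :=
  let colsLower := columns.map (fun col => PySem.Str.lower (PySem.Str.strip col))
  (aliases.any (fun al => colsLower.contains (PySem.Str.lower al))) ||
  (aliases.any (fun al => colsLower.any (fun col => PySem.Str.isIn (PySem.Str.lower al) col)))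

-- ===== PORT B =====
-- aliases_lower precomputed; column-major single pass, each column normalised on the fly.
def has_fuzzy_column_py_alt (columns : List String) (aliases : List String) : Bool :=
  let aliasesLower := aliases.map PySem.Str.lower
  columns.any (fun col =>
    aliasesLower.any (fun a => PySem.Str.isIn a (PySem.Str.lower (PySem.Str.strip col))))

-- ===== PRECONDITION & SPEC =====
def Spec_has_fuzzy_column_py (columns : List String) (aliases : List String) (out : Bool) : Prop := out = has_fuzzy_column_py_alt columns aliases
instance (columns : List String) (aliases : List String) (out : Bool) : Decidable (Spec_has_fuzzy_column_py columns aliases out) := by unfold Spec_has_fuzzy_column_py; infer_instance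

-- ===== CLAIM (what is proved, stated in full; the proofs are below) =====
def Claim_equal_has_fuzzy_column_py : Prop := ∀ (columns : List String) (aliases : List String), Dom_has_fuzzy_column_py columns aliases → Spec_has_fuzzy_column_py columns aliases (has_fuzzy_column_py columns aliases)

-- ===== LEMMAS AND PROOFS =====

-- a string is a substring of itself (Python: x in x)
theorem isIn_self (s : String) : PySem.Str.isIn s s = true := by
  simp [PySem.Chars.isIn_iff_infix]

-- ===== VERDICT (by name: the statement is the Claim_ definition above) =====
theorem has_fuzzy_column_py_spec : Claim_equal_has_fuzzy_column_py := by
  intro columns aliases _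
  unfold Spec_has_fuzzy_column_py has_fuzzy_column_py has_fuzzy_column_py_alt
  rw [Bool.eq_iff_iff]
  simp only [List.any_map, List.any_eq_true, List.mem_map, Bool.or_eq_true, Function.comp,
    List.contains_iff_mem]
  constructor
  · rintro (⟨a, ha, c, hc, hce⟩ | ⟨a, ha, c, hc, hin⟩)
    · exact ⟨c, hc, a, ha, by rw [← hce]; exact isIn_self _⟩
    · exact ⟨c, hc, a, ha, hin⟩
  · rintro ⟨c, hc, a, ha, hin⟩
    exact Or.inr ⟨a, ha, c, hc, hin⟩
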